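-- pv_equiv track=rewrite | github.com/scylladb/scylladb | test/dtest/tools/marks.py | enable_with_features
-- ===== SOURCE A (Python) =====
-- def enable_with_features(features, enabled_features):
--     for feature in features:
--         if not feature:
--             continue
--         if negated := feature[0] == "!":
--             feature = feature[1:]  # noqa: PLW2901
--         if negated:
--             disabled = feature in enabled_features
--         else:
--             disabled = feature not in enabled_features
--         if disabled:
--             return False
--     return True
-- ===== SOURCE B (Python) =====
-- def enable_with_features(features, enabled_features):
--     required = set()
--     forbidden = set()
--     for feature in features:
--         if not feature:
--             continue
--         if feature[0] == "!":
--             forbidden.add(feature[1:])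
--         else:
--             required.add(feature)
--     enabled = set(enabled_features)
--     return required.issubset(enabled) and forbidden.isdisjoint(enabled)
-- ===== Notes on version B (the rewrite author's own statement) =====
-- stated objective: alternative
-- what changed: Replaces the per-feature early-exit branch loop with one pass that partitions features into a required set and a forbidden set (tails of '!'-entries), then decides via required.issubset(enabled) and forbidden.isdisjoint(enabled).
import Mathlib
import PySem

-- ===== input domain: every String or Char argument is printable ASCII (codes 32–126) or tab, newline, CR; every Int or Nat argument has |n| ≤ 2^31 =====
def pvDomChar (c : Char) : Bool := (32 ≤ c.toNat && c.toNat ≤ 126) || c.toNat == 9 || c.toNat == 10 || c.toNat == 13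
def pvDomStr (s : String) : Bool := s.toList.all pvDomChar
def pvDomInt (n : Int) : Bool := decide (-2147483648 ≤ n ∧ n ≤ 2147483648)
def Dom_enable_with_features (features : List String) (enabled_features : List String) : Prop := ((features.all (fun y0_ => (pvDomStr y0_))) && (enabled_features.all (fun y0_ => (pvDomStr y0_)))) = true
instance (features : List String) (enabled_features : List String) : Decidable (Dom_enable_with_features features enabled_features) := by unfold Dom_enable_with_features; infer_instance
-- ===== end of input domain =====

-- B replaces A's early-exit branch loop by partitioning features into a required set and a
-- forbidden set, then decides by a subset and a disjointness test (objective: alternative).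

-- ===== PORT A =====
def enable_with_features (features : List String) (enabled_features : List String) : Bool :=
  match features with
  | [] => true
  | feature :: rest =>
    if feature = "" then
      enable_with_features rest enabled_features
    else
      let negated := PySem.Str.pyGet? feature 0 == some '!'
      let feature := if negated then PySem.Str.slice feature (some 1) none else feature
      let disabled :=
        if negated then enabled_features.contains feature
        else !(enabled_features.contains feature)
      if disabled then false else enable_with_features rest enabled_features

-- ===== PORT B =====
def enable_with_features_alt (features : List String) (enabled_features : List String) : Bool :=
  let rf : PySem.Set String × PySem.Set String :=
    features.foldl (fun p feature =>
      if feature = "" then p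
      else if PySem.Str.pyGet? feature 0 == some '!' then
        (p.1, PySem.Set.add p.2 (PySem.Str.slice feature (some 1) none))
      else
        (PySem.Set.add p.1 feature, p.2)) (PySem.Set.empty, PySem.Set.empty)
  let enabled := PySem.Set.ofList enabled_features
  PySem.Set.issubset rf.1 enabled && PySem.Set.isdisjoint rf.2 enabled

-- ===== PRECONDITION & SPEC =====
def Spec_enable_with_features (features : List String) (enabled_features : List String) (out : Bool) : Prop := out = enable_with_features_alt features enabled_features
instance (features : List String) (enabled_features : List String) (out : Bool) : Decidable (Spec_enable_with_features features enabled_features out) := by unfold Spec_enable_with_features; infer_instance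

-- ===== CLAIM (what is proved, stated in full; the proofs are below) =====
def Claim_equal_enable_with_features : Prop := ∀ (features : List String) (enabled_features : List String), Dom_enable_with_features features enabled_features → Spec_enable_with_features features enabled_features (enable_with_features features enabled_features)

-- ===== LEMMAS AND PROOFS =====

-- the per-feature check A performs
def pvChk (enabled_features : List String) (feature : String) : Bool :=
  if feature = "" then true
  else if PySem.Str.pyGet? feature 0 == some '!' then
    !(enabled_features.contains (PySem.Str.slice feature (some 1) none))
  else enabled_features.contains feature

theorem A_eq_all (features enabled_features : List String) :
    enable_with_features features enabled_features = features.all (pvChk enabled_features) := by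
  induction features with
  | nil => rfl
  | cons f rest ih =>
    by_cases h0 : f = ""
    · simp [enable_with_features, pvChk, h0, ih]
    · by_cases hn : PySem.List.pyGet? f.toList 0 = some '!'
      · by_cases hc : PySem.Str.slice f (some 1) none ∈ enabled_features
        · simp [enable_with_features, pvChk, h0, hn, hc, ih]
        · simp [enable_with_features, pvChk, h0, hn, hc, ih]
      · by_cases hc : f ∈ enabled_features
        · simp [enable_with_features, pvChk, h0, hn, hc, ih]
        · simp [enable_with_features, pvChk, h0, hn, hc, ih]

-- the step function of the B-side fold
def pvStep (p : PySem.Set String × PySem.Set String) (feature : String) :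
    PySem.Set String × PySem.Set String :=
  if feature = "" then p
  else if PySem.Str.pyGet? feature 0 == some '!' then
    (p.1, PySem.Set.add p.2 (PySem.Str.slice feature (some 1) none))
  else
    (PySem.Set.add p.1 feature, p.2)

theorem alt_eq_step (features enabled_features : List String) :
    enable_with_features_alt features enabled_features =
      (PySem.Set.issubset (features.foldl pvStep (PySem.Set.empty, PySem.Set.empty)).1
          (PySem.Set.ofList enabled_features) &&
        PySem.Set.isdisjoint (features.foldl pvStep (PySem.Set.empty, PySem.Set.empty)).2
          (PySem.Set.ofList enabled_features)) := rfl

-- membership characterisation of the pair of sets the B-side fold builds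
theorem mem_fold (features : List String) (p : PySem.Set String × PySem.Set String) (x : String) :
    (x ∈ (features.foldl pvStep p).1 ↔
      x ∈ p.1 ∨ ∃ f ∈ features, f ≠ "" ∧ ¬ (PySem.Str.pyGet? f 0 = some '!') ∧ x = f) ∧
    (x ∈ (features.foldl pvStep p).2 ↔
      x ∈ p.2 ∨ ∃ f ∈ features, f ≠ "" ∧ PySem.Str.pyGet? f 0 = some '!' ∧
        x = PySem.Str.slice f (some 1) none) := by
  induction features generalizing p with
  | nil => simp
  | cons f rest ih =>
    simp only [List.foldl_cons]
    by_cases h0 : f = ""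
    · rw [show pvStep p f = p from by rw [pvStep, if_pos h0]]
      refine ⟨((ih p).1).trans ?_, ((ih p).2).trans ?_⟩ <;>
      · subst h0
        constructor
        · rintro (h | ⟨g, hg, h1, h2, h3⟩)
          · exact Or.inl h
          · exact Or.inr ⟨g, List.mem_cons_of_mem _ hg, h1, h2, h3⟩
        · rintro (h | ⟨g, hg, h1, h2, h3⟩)
          · exact Or.inl h
          · rcases List.mem_cons.mp hg with rfl | hg'
            · exact absurd rfl h1
            · exact Or.inr ⟨g, hg', h1, h2, h3⟩
    · by_cases hn : (PySem.Str.pyGet? f 0 == some '!') = true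
      · have hn' : PySem.Str.pyGet? f 0 = some '!' := beq_iff_eq.mp hn
        rw [show pvStep p f = (p.1, PySem.Set.add p.2 (PySem.Str.slice f (some 1) none)) from by
          rw [pvStep, if_neg h0, if_pos hn]]
        refine ⟨((ih _).1).trans ?_, ((ih _).2).trans ?_⟩
        · constructor
          · rintro (h | ⟨g, hg, h1, h2, h3⟩)
            · exact Or.inl h
            · exact Or.inr ⟨g, List.mem_cons_of_mem _ hg, h1, h2, h3⟩
          · rintro (h | ⟨g, hg, h1, h2, h3⟩)
            · exact Or.inl h
            · rcases List.mem_cons.mp hg with rfl | hg'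
              · exact absurd hn' h2
              · exact Or.inr ⟨g, hg', h1, h2, h3⟩
        · simp only [PySem.Set.mem_add]
          constructor
          · rintro (⟨h | h⟩ | ⟨g, hg, h1, h2, h3⟩)
            · exact Or.inl h
            · exact Or.inr ⟨f, List.mem_cons_self, h0, hn', h⟩
            · exact Or.inr ⟨g, List.mem_cons_of_mem _ hg, h1, h2, h3⟩
          · rintro (h | ⟨g, hg, h1, h2, h3⟩)
            · exact Or.inl (Or.inl h)
            · rcases List.mem_cons.mp hg with rfl | hg'
              · exact Or.inl (Or.inr h3)
              · exact Or.inr ⟨g, hg', h1, h2, h3⟩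
      · have hn' : ¬ PySem.Str.pyGet? f 0 = some '!' := fun h => hn (beq_iff_eq.mpr h)
        rw [show pvStep p f = (PySem.Set.add p.1 f, p.2) from by
          rw [pvStep, if_neg h0, if_neg hn]]
        refine ⟨((ih _).1).trans ?_, ((ih _).2).trans ?_⟩
        · simp only [PySem.Set.mem_add]
          constructor
          · rintro (⟨h | h⟩ | ⟨g, hg, h1, h2, h3⟩)
            · exact Or.inl h
            · exact Or.inr ⟨f, List.mem_cons_self, h0, hn', h⟩
            · exact Or.inr ⟨g, List.mem_cons_of_mem _ hg, h1, h2, h3⟩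
          · rintro (h | ⟨g, hg, h1, h2, h3⟩)
            · exact Or.inl (Or.inl h)
            · rcases List.mem_cons.mp hg with rfl | hg'
              · exact Or.inl (Or.inr h3)
              · exact Or.inr ⟨g, hg', h1, h2, h3⟩
        · constructor
          · rintro (h | ⟨g, hg, h1, h2, h3⟩)
            · exact Or.inl h
            · exact Or.inr ⟨g, List.mem_cons_of_mem _ hg, h1, h2, h3⟩
          · rintro (h | ⟨g, hg, h1, h2, h3⟩)
            · exact Or.inl h
            · rcases List.mem_cons.mp hg with rfl | hg'
              · exact absurd h2 hn'
              · exact Or.inr ⟨g, hg', h1, h2, h3⟩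

theorem B_true_iff (features enabled_features : List String) :
    enable_with_features_alt features enabled_features = true ↔
      ∀ f ∈ features, pvChk enabled_features f = true := by
  rw [alt_eq_step]
  simp only [Bool.and_eq_true, PySem.Set.issubset_iff, PySem.Set.isdisjoint_iff,
    PySem.Set.mem_ofList]
  constructor
  · rintro ⟨hsub, hdis⟩ f hf
    unfold pvChk
    by_cases h0 : f = ""
    · rw [if_pos h0]
    · rw [if_neg h0]
      by_cases hn : (PySem.Str.pyGet? f 0 == some '!') = true
      · rw [if_pos hn]
        have hx : PySem.Str.slice f (some 1) none ∈
            (features.foldl pvStep (PySem.Set.empty, PySem.Set.empty)).2 :=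
          ((mem_fold features _ _).2).mpr (Or.inr ⟨f, hf, h0, beq_iff_eq.mp hn, rfl⟩)
        simpa using hdis _ hx
      · rw [if_neg hn]
        have hx : f ∈ (features.foldl pvStep (PySem.Set.empty, PySem.Set.empty)).1 :=
          ((mem_fold features _ _).1).mpr
            (Or.inr ⟨f, hf, h0, fun h => hn (beq_iff_eq.mpr h), rfl⟩)
        simpa using hsub _ hx
  · intro h
    refine ⟨?_, ?_⟩
    · intro x hx
      rcases ((mem_fold features _ x).1).mp hx with h' | ⟨g, hg, h1, h2, rfl⟩
      · simp [PySem.Set.empty] at h'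
      · have hg' := h _ hg
        unfold pvChk at hg'
        rw [if_neg h1, if_neg (fun hc => h2 (beq_iff_eq.mp hc))] at hg'
        simpa using hg'
    · intro x hx
      rcases ((mem_fold features _ x).2).mp hx with h' | ⟨g, hg, h1, h2, rfl⟩
      · simp [PySem.Set.empty] at h'
      · have hg' := h _ hg
        unfold pvChk at hg'
        rw [if_neg h1, if_pos (beq_iff_eq.mpr h2)] at hg'
        simpa using hg'

-- ===== VERDICT (by name: the statement is the Claim_ definition above) =====
theorem enable_with_features_spec : Claim_equal_enable_with_features := by
  intro features enabled_features _
  unfold Spec_enable_with_features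
  rw [A_eq_all, Bool.eq_iff_iff, B_true_iff, List.all_eq_true]
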